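-- pv_equiv track=rewrite | github.com/jonatanskogsfors/aoc2023 | src/aoc2023/day_14.py | spin_cycle
-- ===== SOURCE A (Python) =====
-- import enum
--
-- class Direction(enum.Enum):
--     NORTH = 0
--     WEST = 1
--     SOUTH = 2
--     EAST = 4
--
-- def tilt_platform(positions: tuple[str, ...], direction=Direction.NORTH):
--     match direction:
--         case Direction.NORTH:
--             transposed_positions = list("".join(reversed(row)) for row in zip(*positions))
--         case Direction.WEST:
--             transposed_positions = list("".join(reversed(row)) for row in positions)
--         case Direction.SOUTH:
--             transposed_positions = list("".join(row) for row in zip(*positions))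
--         case Direction.EAST:
--             transposed_positions = list(positions)
--
--     for n, column in enumerate(transposed_positions):
--         between_the_cubes = ["".join(sorted(space)) for space in column.split("#")]
--         transposed_positions[n] = "#".join(between_the_cubes)
--
--     match direction:
--         case Direction.NORTH:
--             positions = [
--                 "".join(row)
--                 for row in zip(*[reversed(column) for column in transposed_positions])
--             ]
--         case Direction.WEST:
--             positions = ["".join(reversed(row)) for row in transposed_positions]
--         case Direction.SOUTH:
--             positions = ["".join(row) for row in zip(*transposed_positions)]
--         case Direction.EAST:
--             positions = transposed_positions
--
--     return tuple(positions)
--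
-- def spin_cycle(positions, spin_cycles):
--     for _ in range(spin_cycles):
--         for direction in (
--             Direction.NORTH,
--             Direction.WEST,
--             Direction.SOUTH,
--             Direction.EAST,
--         ):
--             positions = tilt_platform(positions, direction)
--     return positions
-- ===== SOURCE B (Python) =====
-- # B: one spin-cycle is a fused pipeline of four transpose+tilt passes, and the
-- # outer loop memoizes seen states to detect a cycle and fast-forward to the
-- # final state instead of running all spin_cycles iterations.
--
-- def _transpose(rows):
--     return ["".join(col) for col in zip(*rows)]
--
--
-- def _tilt(line):
--     return "#".join("".join(sorted(seg)) for seg in line.split("#"))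
--
--
-- def _tilt_rev(line):
--     return _tilt(line[::-1])[::-1]
--
--
-- def _spin_once(rows):
--     x = [_tilt_rev(col) for col in _transpose(rows)]   # north (in column space)
--     x = [_tilt_rev(row) for row in _transpose(x)]      # west
--     x = [_tilt(col) for col in _transpose(x)]          # south (in column space)
--     return tuple(_tilt(row) for row in _transpose(x))  # east
--
--
-- def spin_cycle(positions, spin_cycles):
--     if spin_cycles <= 0:
--         return positions
--     state = tuple(positions)
--     seen = {state: 0}
--     history = [state]
--     i = 0
--     while True:
--         state = _spin_once(state)
--         i += 1
--         if state in seen: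
--             start = seen[state]
--             period = i - start
--             return history[start + (spin_cycles - start) % period]
--         if i >= spin_cycles:
--             return state
--         seen[state] = i
--         history.append(state)
-- ===== Notes on version B (the rewrite author's own statement) =====
-- stated objective: faster
-- what changed: B memoizes every grid state of the spin loop, detects the first repeated state and fast-forwards arithmetic-modulo-cycle-length to the final state instead of simulating all spin_cycles iterations, and fuses the four directional tilts of one spin into a single transpose/tilt pipeline without per-direction branching.
import Mathlib
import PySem

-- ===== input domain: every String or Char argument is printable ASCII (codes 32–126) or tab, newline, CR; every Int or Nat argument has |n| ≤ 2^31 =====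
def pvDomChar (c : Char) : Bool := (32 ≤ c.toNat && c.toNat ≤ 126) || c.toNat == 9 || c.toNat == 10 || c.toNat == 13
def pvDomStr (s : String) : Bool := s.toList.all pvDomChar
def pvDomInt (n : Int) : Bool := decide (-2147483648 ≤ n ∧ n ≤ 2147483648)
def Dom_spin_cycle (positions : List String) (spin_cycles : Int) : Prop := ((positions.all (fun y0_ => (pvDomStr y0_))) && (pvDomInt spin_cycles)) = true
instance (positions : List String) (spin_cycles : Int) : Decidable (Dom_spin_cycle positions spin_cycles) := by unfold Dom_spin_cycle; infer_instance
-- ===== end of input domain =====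

-- B replaces A's simulation of every spin by state memoization with cycle detection and
-- fast-forward, and fuses the four tilts of one spin into one transpose/tilt pipeline.

-- shared model of the Python builtin zip(*rows): truncating transposition
def pyZipT (rows : List (List Char)) : List (List Char) :=
  (List.range ((rows.map List.length).min?.getD 0)).map
    (fun i => rows.map (fun r => r.getD i ' '))

-- ===== PORT A =====
-- "#".join("".join(sorted(space)) for space in column.split("#"))
def tiltColA (col : List Char) : List Char :=
  PySem.Chars.join ['#'] ((PySem.Chars.splitOn col ['#']).map
    (fun s => PySem.List.sorted s (fun c => c) false))

-- tilt_platform; directions NORTH, WEST, SOUTH, EAST encoded as 0, 1, 2, 3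
def tilt_platformA (positions : List (List Char)) (dir : Nat) : List (List Char) :=
  let t :=
    if dir = 0 then (pyZipT positions).map List.reverse
    else if dir = 1 then positions.map List.reverse
    else if dir = 2 then pyZipT positions
    else positions
  let t2 := t.map tiltColA
  if dir = 0 then pyZipT (t2.map List.reverse)
  else if dir = 1 then t2.map List.reverse
  else if dir = 2 then pyZipT t2
  else t2

def spin_cycle (positions : List String) (spin_cycles : Int) : List String :=
  ((PySem.List.pyRange 0 spin_cycles 1).foldl
    (fun pos _ => [0, 1, 2, 3].foldl (fun p d => tilt_platformA p d) pos)
    (positions.map String.toList)).map (fun cs => String.ofList cs)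

-- ===== PORT B =====
def bTilt (line : List Char) : List Char :=
  PySem.Chars.join ['#'] ((PySem.Chars.splitOn line ['#']).map
    (fun s => PySem.List.sorted s (fun c => c) false))

def bTiltRev (line : List Char) : List Char := (bTilt line.reverse).reverse

def bSpinOnce (rows : List (List Char)) : List (List Char) :=
  let x1 := (pyZipT rows).map bTiltRev
  let x2 := (pyZipT x1).map bTiltRev
  let x3 := (pyZipT x2).map bTilt
  (pyZipT x3).map bTilt

def bLoop (n : Nat) (state : List (List Char)) (seen : PySem.Dict (List (List Char)) Nat)
    (history : List (List (List Char))) (i : Nat) (fuel : Nat) : List (List Char) :=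
  match fuel with
  | 0 => state
  | fuel + 1 =>
    let s' := bSpinOnce state
    let i' := i + 1
    match seen.get? s' with
    | some start => history.getD (start + (n - start) % (i' - start)) s'
    | none =>
      if i' < n then bLoop n s' (seen.insert s' i') (history ++ [s']) i' fuel
      else s'

def spin_cycle_alt (positions : List String) (spin_cycles : Int) : List String :=
  if spin_cycles ≤ 0 then positions
  else
    let s0 := positions.map String.toList
    let n := spin_cycles.toNat
    (bLoop n s0 (PySem.Dict.empty.insert s0 0) [s0] 0 n).map (fun cs => String.ofList cs)

-- ===== PRECONDITION & SPEC =====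
def Spec_spin_cycle (positions : List String) (spin_cycles : Int) (out : List String) : Prop := out = spin_cycle_alt positions spin_cycles
instance (positions : List String) (spin_cycles : Int) (out : List String) : Decidable (Spec_spin_cycle positions spin_cycles out) := by unfold Spec_spin_cycle; infer_instance

-- ===== CLAIM (what is proved, stated in full; the proofs are below) =====
def Claim_equal_spin_cycle : Prop := ∀ (positions : List String) (spin_cycles : Int), Dom_spin_cycle positions spin_cycles → Spec_spin_cycle positions spin_cycles (spin_cycle positions spin_cycles)

-- ===== LEMMAS AND PROOFS =====

-- one full spin of A (the four tilts in order N, W, S, E) is B's fused pipeline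
lemma stepA_eq_bSpinOnce (p : List (List Char)) :
    [0, 1, 2, 3].foldl (fun p d => tilt_platformA p d) p = bSpinOnce p := by
  have h1 : bTilt = tiltColA := rfl
  have h2 : bTiltRev = fun x => (tiltColA x.reverse).reverse := funext fun _ => rfl
  simp [tilt_platformA, bSpinOnce, List.map_map, Function.comp_def, h1, h2]

-- a foldl that ignores the list elements is iteration
lemma foldl_const_eq_iterate {α β : Type} (l : List β) (g : α → α) (x : α) :
    l.foldl (fun a _ => g a) x = g^[l.length] x := by
  induction l generalizing x with
  | nil => rfl
  | cons h t ih => simp [List.foldl, ih, Function.iterate_succ_apply]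

lemma spin_cycle_eq_iterate (positions : List String) (n : Int) :
    spin_cycle positions n
      = (bSpinOnce^[n.toNat] (positions.map String.toList)).map (fun cs => String.ofList cs) := by
  unfold spin_cycle
  rw [show (fun (pos : List (List Char)) (_ : Int) =>
        [0, 1, 2, 3].foldl (fun p d => tilt_platformA p d) pos)
      = (fun pos _ => bSpinOnce pos) from funext fun pos => funext fun _ => stepA_eq_bSpinOnce pos]
  rw [foldl_const_eq_iterate, PySem.List.length_pyRange_one]
  norm_num

-- correctness of the memoized fast-forward loop
set_option maxHeartbeats 1000000 in
lemma bLoop_eq (fuel : Nat) : ∀ (n i : Nat) (state : List (List Char))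
    (seen : PySem.Dict (List (List Char)) Nat) (history : List (List (List Char)))
    (a : List (List Char)),
    n ≤ i + fuel →
    state = bSpinOnce^[i] a →
    (∀ s k, seen.get? s = some k → k ≤ i ∧ bSpinOnce^[k] a = s) →
    history = (List.range (i + 1)).map (fun k => bSpinOnce^[k] a) →
    i < n →
    bLoop n state seen history i fuel = bSpinOnce^[n] a := by
  induction fuel with
  | zero => intro n i state seen history a hfuel _ _ _ hin; omega
  | succ fuel ih =>
    intro n i state seen history a hfuel hstate hseen hhist hin
    have hs' : bSpinOnce state = bSpinOnce^[i + 1] a := by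
      rw [hstate]; exact (Function.iterate_succ_apply' bSpinOnce i a).symm
    simp only [bLoop]
    cases hget : seen.get? (bSpinOnce state) with
    | some start =>
      simp only []
      obtain ⟨hle, heq⟩ := hseen _ _ hget
      have hppos : 0 < i + 1 - start := by omega
      have hper : Function.IsPeriodicPt bSpinOnce (i + 1 - start) (bSpinOnce^[start] a) := by
        show bSpinOnce^[i + 1 - start] (bSpinOnce^[start] a) = bSpinOnce^[start] a
        rw [← Function.iterate_add_apply]
        have h9 : i + 1 - start + start = i + 1 := by omega
        rw [h9, ← hs', heq]
      have hr : (n - start) % (i + 1 - start) < i + 1 - start := Nat.mod_lt _ hppos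
      have hidx : start + (n - start) % (i + 1 - start) < i + 1 := by omega
      have hval : history.getD (start + (n - start) % (i + 1 - start)) (bSpinOnce state)
          = bSpinOnce^[start + (n - start) % (i + 1 - start)] a := by
        subst hhist
        rw [List.getD_eq_getElem _ _ (by simpa using hidx)]
        simp only [List.getElem_map, List.getElem_range]
      rw [hval]
      have hiter : bSpinOnce^[n] a
          = bSpinOnce^[(n - start) % (i + 1 - start)] (bSpinOnce^[start] a) := by
        rw [hper.iterate_mod_apply (n - start), ← Function.iterate_add_apply]
        have h9 : n - start + start = n := by omega
        rw [h9]
      rw [hiter, ← Function.iterate_add_apply]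
      congr 1
      omega
    | none =>
      simp only []
      by_cases hlt : i + 1 < n
      · rw [if_pos hlt]
        apply ih n (i + 1) _ _ _ a (by omega) hs' ?_ ?_ hlt
        · intro s k hk
          by_cases hsk : s = bSpinOnce state
          · subst hsk
            rw [PySem.Dict.get?_insert_self] at hk
            cases hk
            exact ⟨Nat.le_refl _, hs'.symm⟩
          · rw [PySem.Dict.get?_insert_of_ne _ _ hsk] at hk
            obtain ⟨h1, h2⟩ := hseen s k hk
            exact ⟨by omega, h2⟩
        · rw [hhist, hs']
          conv_rhs => rw [List.range_succ, List.map_append]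
          rfl
      · rw [if_neg hlt]
        have h9 : n = i + 1 := by omega
        rw [hs', h9]

-- ===== VERDICT (by name: the statement is the Claim_ definition above) =====
theorem spin_cycle_spec : Claim_equal_spin_cycle := by
  intro positions n _
  unfold Spec_spin_cycle spin_cycle_alt
  by_cases hn : n ≤ 0
  · simp only [hn, if_true]
    rw [spin_cycle_eq_iterate]
    have h0 : n.toNat = 0 := by omega
    simp [h0, List.map_map, Function.comp_def]
  · simp only [hn, if_false]
    rw [spin_cycle_eq_iterate]
    have hpos : 0 < n.toNat := by omega
    rw [bLoop_eq n.toNat n.toNat 0 _ _ _ (positions.map String.toList)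
      (by omega) (by simp)
      (by
        intro s k hk
        by_cases hsk : s = positions.map String.toList
        · subst hsk
          rw [PySem.Dict.get?_insert_self] at hk
          cases hk
          exact ⟨Nat.le_refl _, rfl⟩
        · rw [PySem.Dict.get?_insert_of_ne _ _ hsk] at hk
          simp [PySem.Dict.get?, PySem.Dict.empty] at hk)
      (by simp) hpos]
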